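-- pv_equiv track=rewrite | github.com/Jeloren/lab0_nazarov | lab5/lab5.py | bit_expand_proc
-- ===== SOURCE A (Python) =====
-- def bit_expand_proc(source_bytes, result_bytes, bit_length):
--     dest_abs_bit_pos = 0
--
--     for i in range(bit_length):
--         src_byte_idx = i // 8
--         src_bit_pos = i % 8
--
--         if src_byte_idx >= len(source_bytes):
--             source_bit = 0
--         else:
--             source_byte = source_bytes[src_byte_idx]
--             source_bit = (source_byte >> src_bit_pos) & 1
--
--         if source_bit == 0:
--             expanded_bits = [0, 1]
--         else:
--             expanded_bits = [1, 0]
--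
--         for bit_val in expanded_bits:
--             dest_byte_idx = dest_abs_bit_pos // 8
--             dest_bit_offset = dest_abs_bit_pos % 8
--
--             if dest_byte_idx < len(result_bytes):
--                 if bit_val == 1:
--                     result_bytes[dest_byte_idx] |= (1 << dest_bit_offset)
--                 else:
--                     result_bytes[dest_byte_idx] &= ~(1 << dest_bit_offset)
--
--             dest_abs_bit_pos += 1
--
--     return result_bytes
-- ===== SOURCE B (Python) =====
-- def bit_expand_proc(source_bytes, result_bytes, bit_length):
--     # Per-destination-byte closed form: destination byte j receives source bits
--     # 4j..4j+3, each contributing (2 - s) at weight 4**t; the written low bits of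
--     # the original byte are removed arithmetically (orig - orig % 2**m), so no
--     # bitwise set/clear operations are needed at all.
--     total = 2 * bit_length
--     out = []
--     for j, orig in enumerate(result_bytes):
--         m = min(8, total - 8 * j)
--         if m <= 0:
--             out.append(orig)
--         else:
--             val = 0
--             for t in range(m // 2):
--                 i = 4 * j + t
--                 if i // 8 < len(source_bytes):
--                     s = (source_bytes[i // 8] >> (i % 8)) & 1
--                 else:
--                     s = 0
--                 val += (2 - s) * 4 ** t
--             out.append(orig - orig % 2 ** m + val)
--     result_bytes[:] = out
--     return result_bytes
-- ===== Notes on version B (the rewrite author's own statement) =====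
-- stated objective: alternative
-- what changed: Replaces A's per-bit algorithm (iterate over source bits, expand each into two bits, set/clear destination bits one at a time with |=/&=~ masks while threading a running destination-bit counter) with a per-destination-byte closed form: each result byte is computed in one arithmetic expression orig - orig % 2**m + sum((2 - s_t) * 4**t), using no bitwise set/clear writes at all; the loop runs over result bytes instead of source bits, so out-of-range destination writes never occur.
import Mathlib
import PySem

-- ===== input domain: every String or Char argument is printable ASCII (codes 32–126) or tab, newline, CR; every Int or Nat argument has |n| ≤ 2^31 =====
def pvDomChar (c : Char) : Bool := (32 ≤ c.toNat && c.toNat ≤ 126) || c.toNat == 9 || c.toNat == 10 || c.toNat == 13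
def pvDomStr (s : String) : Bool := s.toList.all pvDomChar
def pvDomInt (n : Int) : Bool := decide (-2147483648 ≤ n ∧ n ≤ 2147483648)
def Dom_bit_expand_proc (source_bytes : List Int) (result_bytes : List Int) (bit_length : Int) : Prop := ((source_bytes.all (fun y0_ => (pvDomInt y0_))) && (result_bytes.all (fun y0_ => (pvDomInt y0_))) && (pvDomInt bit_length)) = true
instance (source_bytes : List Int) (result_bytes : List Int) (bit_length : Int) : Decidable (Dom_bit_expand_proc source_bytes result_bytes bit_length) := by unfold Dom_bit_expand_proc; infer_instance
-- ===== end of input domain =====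

-- B replaces A's per-bit set/clear loop over source bits with a per-result-byte
-- arithmetic closed form (orig - orig % 2^m + Σ (2 - s_t)·4^t); alternative
-- decomposition, no bitwise writes. Both Pythons mutate result_bytes in place and
-- end with the same list; the equivalence proved here is about the returned value.


-- ===== PORT A =====
def bit_expand_proc (source_bytes : List Int) (result_bytes : List Int) (bit_length : Int) : List Int :=
  ((List.range bit_length.toNat).foldl (fun (st : List Int × Nat) i =>
    let src_byte_idx := i / 8
    let src_bit_pos := i % 8
    let source_bit : Int :=
      if src_byte_idx ≥ source_bytes.length then 0
      else PySem.Int.band ((source_bytes.getD src_byte_idx 0) >>> src_bit_pos) 1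
    let expanded_bits : List Int := if source_bit = 0 then [0, 1] else [1, 0]
    expanded_bits.foldl (fun (st2 : List Int × Nat) bit_val =>
      let dest_byte_idx := st2.2 / 8
      let dest_bit_offset := st2.2 % 8
      let r :=
        if dest_byte_idx < st2.1.length then
          st2.1.modify dest_byte_idx (fun x =>
            if bit_val = 1 then PySem.Int.bor x ((1 : Int) <<< dest_bit_offset)
            else PySem.Int.band x (Int.not ((1 : Int) <<< dest_bit_offset)))
        else st2.1
      (r, st2.2 + 1)) st) (result_bytes, 0)).1

-- ===== PORT B =====
def bit_expand_proc_alt (source_bytes : List Int) (result_bytes : List Int) (bit_length : Int) : List Int :=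
  let total : Int := 2 * bit_length
  result_bytes.zipIdx.foldl (fun (out : List Int) (oj : Int × Nat) =>
    let m : Int := min 8 (total - 8 * (oj.2 : Int))
    if m ≤ 0 then out ++ [oj.1]
    else
      let val : Int := (List.range (m.toNat / 2)).foldl (fun v t =>
        let i := 4 * oj.2 + t
        let s : Int :=
          if i / 8 < source_bytes.length
          then PySem.Int.band ((source_bytes.getD (i / 8) 0) >>> (i % 8)) 1
          else 0
        v + (2 - s) * 4 ^ t) 0
      out ++ [oj.1 - oj.1 % (2 : Int) ^ m.toNat + val]) []

-- ===== PRECONDITION & SPEC =====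
def Spec_bit_expand_proc (source_bytes : List Int) (result_bytes : List Int) (bit_length : Int) (out : List Int) : Prop := out = bit_expand_proc_alt source_bytes result_bytes bit_length
instance (source_bytes : List Int) (result_bytes : List Int) (bit_length : Int) (out : List Int) : Decidable (Spec_bit_expand_proc source_bytes result_bytes bit_length out) := by unfold Spec_bit_expand_proc; infer_instance

-- ===== CLAIM (what is proved, stated in full; the proofs are below) =====
def Claim_equal_bit_expand_proc : Prop := ∀ (source_bytes : List Int) (result_bytes : List Int) (bit_length : Int), Dom_bit_expand_proc source_bytes result_bytes bit_length → Spec_bit_expand_proc source_bytes result_bytes bit_length (bit_expand_proc source_bytes result_bytes bit_length)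

-- ===== LEMMAS AND PROOFS =====

-- the source bit feeding destination pair i (0 past the end of source_bytes)
def pvSrc (source_bytes : List Int) (i : Nat) : Int :=
  if i / 8 ≥ source_bytes.length then 0
  else PySem.Int.band ((source_bytes.getD (i / 8) 0) >>> (i % 8)) 1

-- the single destination-bit write A performs
def pvWr (r : List Int) (b : Int) (d : Nat) : List Int :=
  if d / 8 < r.length then
    r.modify (d / 8) (fun x =>
      if b = 1 then PySem.Int.bor x ((1 : Int) <<< (d % 8))
      else PySem.Int.band x (Int.not ((1 : Int) <<< (d % 8))))
  else r

-- A's outer-loop body, phrased with pvSrc/pvWr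
def pvAStep (source_bytes : List Int) (st : List Int × Nat) (i : Nat) : List Int × Nat :=
  (pvWr (pvWr st.1 (pvSrc source_bytes i) st.2) (1 - pvSrc source_bytes i) (st.2 + 1), st.2 + 2)

def pvBStep (r : List Int) (bd : Int × Nat) : List Int := pvWr r bd.1 bd.2

def pvExpanded (source_bytes : List Int) (n : Nat) : List Int :=
  (List.range n).flatMap (fun i => [pvSrc source_bytes i, 1 - pvSrc source_bytes i])

-- destination bit d of the expanded stream
def pvBitf (s : List Int) (d : Nat) : Int :=
  if d % 2 = 0 then pvSrc s (d / 2) else 1 - pvSrc s (d / 2)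

-- one in-byte bit update (what pvWr does to the addressed byte)
def pvUpd (x : Int) (k : Nat) (b : Int) : Int :=
  if b = 1 then PySem.Int.bor x ((1 : Int) <<< k)
  else PySem.Int.band x (Int.not ((1 : Int) <<< k))

-- the write pass, L remaining destination bits, absolute bit base `base`
def pvW (s : List Int) (r : List Int) (L : Nat) (base : Nat) : List Int :=
  (List.range L).foldl (fun r d => pvWr r (pvBitf s (base + d)) d) r

-- all writes into one byte
def pvApply (s : List Int) (a : Int) (m : Nat) (base : Nat) : Int :=
  (List.range m).foldl (fun x k => pvUpd x k (pvBitf s (base + k))) a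

-- value of the m written bits
def pvV (s : List Int) (m : Nat) (base : Nat) : Int :=
  (List.range m).foldl (fun v k => v + pvBitf s (base + k) * 2 ^ k) 0

-- B's per-byte closed form
def pvG (s : List Int) (bl : Int) (oj : Int × Nat) : Int :=
  if min (8:Int) (2 * bl - 8 * (oj.2:Int)) ≤ 0 then oj.1
  else oj.1 - oj.1 % (2:Int) ^ (min (8:Int) (2 * bl - 8 * (oj.2:Int))).toNat
       + (List.range ((min (8:Int) (2 * bl - 8 * (oj.2:Int))).toNat / 2)).foldl
           (fun v t => v + (2 - pvSrc s (4 * oj.2 + t)) * 4 ^ t) 0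

lemma pvSrc_cases (s : List Int) (i : Nat) : pvSrc s i = 0 ∨ pvSrc s i = 1 := by
  unfold pvSrc
  split
  · exact Or.inl rfl
  · simp [PySem.Int.band]; split <;> omega

lemma pvBitf_cases (s : List Int) (d : Nat) : pvBitf s d = 0 ∨ pvBitf s d = 1 := by
  unfold pvBitf
  rcases pvSrc_cases s (d / 2) with h | h <;> rw [h] <;> split <;> simp

lemma pvInner_eq (s0 : Int) (h : s0 = 0 ∨ s0 = 1) (st : List Int × Nat) :
    (if s0 = 0 then ([0, 1] : List Int) else [1, 0]).foldl
      (fun (st2 : List Int × Nat) bit_val =>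
        let dest_byte_idx := st2.2 / 8
        let dest_bit_offset := st2.2 % 8
        let r :=
          if dest_byte_idx < st2.1.length then
            st2.1.modify dest_byte_idx (fun x =>
              if bit_val = 1 then PySem.Int.bor x ((1 : Int) <<< dest_bit_offset)
              else PySem.Int.band x (Int.not ((1 : Int) <<< dest_bit_offset)))
          else st2.1
        (r, st2.2 + 1)) st
    = (pvWr (pvWr st.1 s0 st.2) (1 - s0) (st.2 + 1), st.2 + 2) := by
  rcases h with h | h <;> subst h <;>
    simp [List.foldl, pvWr]

lemma pvAStep_eq (s : List Int) (st : List Int × Nat) (i : Nat) :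
    (fun (st : List Int × Nat) i =>
      let src_byte_idx := i / 8
      let src_bit_pos := i % 8
      let source_bit : Int :=
        if src_byte_idx ≥ s.length then 0
        else PySem.Int.band ((s.getD src_byte_idx 0) >>> src_bit_pos) 1
      let expanded_bits : List Int := if source_bit = 0 then [0, 1] else [1, 0]
      expanded_bits.foldl (fun (st2 : List Int × Nat) bit_val =>
        let dest_byte_idx := st2.2 / 8
        let dest_bit_offset := st2.2 % 8
        let r :=
          if dest_byte_idx < st2.1.length then
            st2.1.modify dest_byte_idx (fun x =>
              if bit_val = 1 then PySem.Int.bor x ((1 : Int) <<< dest_bit_offset)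
              else PySem.Int.band x (Int.not ((1 : Int) <<< dest_bit_offset)))
          else st2.1
        (r, st2.2 + 1)) st) st i = pvAStep s st i := by
  show (if pvSrc s i = 0 then ([0, 1] : List Int) else [1, 0]).foldl _ st = _
  rw [pvInner_eq (pvSrc s i) (pvSrc_cases s i) st]
  rfl

lemma pvExpanded_length (s : List Int) (n : Nat) : (pvExpanded s n).length = 2 * n := by
  induction n with
  | zero => rfl
  | succ m ih =>
    unfold pvExpanded at *
    rw [List.range_succ, List.flatMap_append, List.length_append, ih]
    simp; omega

lemma pvMain (s : List Int) (r : List Int) (n : Nat) :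
    (List.range n).foldl (pvAStep s) (r, 0) =
      ((pvExpanded s n).zipIdx.foldl pvBStep r, 2 * n) := by
  induction n with
  | zero => simp [pvExpanded]
  | succ m ih =>
    rw [List.range_succ, List.foldl_append, ih]
    unfold pvExpanded
    rw [List.range_succ, List.flatMap_append, List.zipIdx_append, List.foldl_append]
    rw [show ((List.range m).flatMap
        (fun i => [pvSrc s i, 1 - pvSrc s i])).length = 2 * m from pvExpanded_length s m]
    simp only [List.flatMap_cons, List.flatMap_nil, List.append_nil, List.zipIdx_cons,
      List.zipIdx_nil, List.foldl_cons, List.foldl_nil, pvAStep, pvBStep]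
    refine Prod.ext ?_ ?_
    · simp
    · simp; omega

lemma pvExpanded_eq_map (s : List Int) (n : Nat) :
    pvExpanded s n = (List.range (2 * n)).map (pvBitf s) := by
  induction n with
  | zero => rfl
  | succ m ih =>
    unfold pvExpanded at *
    rw [List.range_succ, List.flatMap_append, ih,
      show 2 * (m + 1) = 2 * m + 2 from by ring, List.range_add, List.map_append]
    congr 1
    have e0 : 2 * m % 2 = 0 := by omega
    have e1 : (2 * m + 1) % 2 = 1 := by omega
    have d0 : 2 * m / 2 = m := by omega
    have d1 : (2 * m + 1) / 2 = m := by omega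
    simp [List.range_succ, pvBitf, e0, e1, d0, d1]

lemma pvZip_fold (s : List Int) (r : List Int) (L : Nat) :
    ((List.range L).map (pvBitf s)).zipIdx.foldl pvBStep r = pvW s r L 0 := by
  induction L generalizing r with
  | zero => rfl
  | succ K ih =>
    rw [List.range_succ, List.map_append, List.zipIdx_append, List.foldl_append]
    unfold pvW
    rw [List.range_succ, List.foldl_append]
    rw [ih]
    simp [pvBStep, pvW, List.length_map]

lemma pvW_nil (s : List Int) (L base : Nat) : pvW s [] L base = [] := by
  unfold pvW
  induction L with
  | zero => rfl
  | succ K ih => rw [List.range_succ, List.foldl_append, ih]; simp [pvWr]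

lemma pvWr_cons_lt (a : Int) (r : List Int) (b : Int) (d : Nat) (h : d < 8) :
    pvWr (a :: r) b d = pvUpd a d b :: r := by
  have h8 : d / 8 = 0 := Nat.div_eq_of_lt h
  have hm : d % 8 = d := Nat.mod_eq_of_lt h
  simp [pvWr, pvUpd, h8, hm, List.modify_zero_cons]

lemma pvWr_cons_ge (a : Int) (r : List Int) (b : Int) (d : Nat) (h : 8 ≤ d) :
    pvWr (a :: r) b d = a :: pvWr r b (d - 8) := by
  have h1 : d / 8 = (d - 8) / 8 + 1 := by omega
  have h2 : d % 8 = (d - 8) % 8 := by omega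
  simp only [pvWr, h1, h2, List.length_cons, List.modify_succ_cons]
  by_cases hc : (d - 8) / 8 < r.length
  · simp [hc]
  · simp [hc]

lemma pvFold_head (f : Nat → Int) (a : Int) (r : List Int) (m : Nat) (hm : m ≤ 8) :
    (List.range m).foldl (fun r d => pvWr r (f d) d) (a :: r)
      = ((List.range m).foldl (fun x k => pvUpd x k (f k)) a) :: r := by
  induction m with
  | zero => rfl
  | succ K ih =>
    rw [List.range_succ, List.foldl_append, List.foldl_append, ih (by omega)]
    simp [List.foldl]
    rw [pvWr_cons_lt _ _ _ _ (by omega)]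

lemma pvFold_tail (f : Nat → Int) (a : Int) (r : List Int) (ds : List Nat) :
    ds.foldl (fun r d => pvWr r (f d) (d + 8)) (a :: r)
      = a :: ds.foldl (fun r d => pvWr r (f d) d) r := by
  induction ds generalizing r with
  | nil => rfl
  | cons d ds ih =>
    simp only [List.foldl_cons]
    rw [pvWr_cons_ge _ _ _ _ (by omega)]
    simp only [Nat.add_sub_cancel]
    exact ih _

lemma pvW_cons (s : List Int) (a : Int) (r : List Int) (L base : Nat) :
    pvW s (a :: r) L base = pvApply s a (min L 8) base :: pvW s r (L - 8) (base + 8) := by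
  by_cases hL : L ≤ 8
  · have h1 : min L 8 = L := by omega
    have h2 : L - 8 = 0 := by omega
    unfold pvW pvApply
    rw [h1, h2]
    simpa using pvFold_head (fun d => pvBitf s (base + d)) a r L hL
  · have h1 : min L 8 = 8 := by omega
    unfold pvW pvApply
    rw [h1, show L = 8 + (L - 8) from by omega, List.range_add, List.foldl_append,
      pvFold_head (fun d => pvBitf s (base + d)) a r 8 (by omega), List.foldl_map]
    have hfn : (fun (r : List Int) (d : Nat) => pvWr r (pvBitf s (base + (8 + d))) (8 + d))
        = (fun (r : List Int) (d : Nat) => pvWr r (pvBitf s (base + 8 + d)) (d + 8)) := by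
      funext r d
      have e1 : base + (8 + d) = base + 8 + d := by omega
      have e2 : (8 + d) = d + 8 := by omega
      rw [e1, e2]
    rw [hfn, pvFold_tail (fun d => pvBitf s (base + 8 + d)) _ r,
      show 8 + (L - 8) - 8 = L - 8 from by omega]

lemma pvMod2_or (a b : Nat) : (a ||| b) % 2 = 1 ↔ (a % 2 = 1 ∨ b % 2 = 1) := by
  have h := Nat.testBit_or a b 0
  simp only [Nat.testBit_zero] at h
  rcases Nat.mod_two_eq_zero_or_one (a|||b) with h1 | h1 <;>
  rcases Nat.mod_two_eq_zero_or_one a with h2 | h2 <;>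
  rcases Nat.mod_two_eq_zero_or_one b with h3 | h3 <;>
  simp [h1, h2, h3] at h ⊢

lemma pvMod2_and (a b : Nat) : (a &&& b) % 2 = 1 ↔ (a % 2 = 1 ∧ b % 2 = 1) := by
  have h := Nat.testBit_and a b 0
  simp only [Nat.testBit_zero] at h
  rcases Nat.mod_two_eq_zero_or_one (a&&&b) with h1 | h1 <;>
  rcases Nat.mod_two_eq_zero_or_one a with h2 | h2 <;>
  rcases Nat.mod_two_eq_zero_or_one b with h3 | h3 <;>
  simp [h1, h2, h3] at h ⊢

lemma pvNSUM (k : Nat) : ∀ n : Nat, (n ||| 2 ^ k) + (n &&& 2 ^ k) = n + 2 ^ k := by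
  induction k with
  | zero =>
    intro n
    have h1 : (n ||| 1) / 2 = n / 2 := by
      have := @Nat.or_div_two n 1
      simpa using this
    have h2 : (n ||| 1) % 2 = 1 := by
      rcases Nat.mod_two_eq_zero_or_one (n ||| 1) with h | h
      · exfalso; have := (pvMod2_or n 1).2 (Or.inr (by omega)); omega
      · exact h
    have h3 := Nat.div_add_mod (n ||| 1) 2
    have h4 := Nat.div_add_mod n 2
    have h5 : n &&& 1 = n % 2 := Nat.and_one_is_mod n
    simp only [pow_zero]
    omega
  | succ k ih =>
    intro n
    have hp : (2:Nat) ^ (k+1) = 2 * 2 ^ k := by ring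
    have hpe : (2:Nat) ^ (k+1) % 2 = 0 := by omega
    have hpd : (2:Nat) ^ (k+1) / 2 = 2 ^ k := by omega
    have h1 : (n ||| 2^(k+1)) / 2 = n / 2 ||| 2^k := by
      have := @Nat.or_div_two n (2^(k+1)); rw [hpd] at this; exact this
    have h2 : (n &&& 2^(k+1)) / 2 = n / 2 &&& 2^k := by
      have := @Nat.and_div_two n (2^(k+1)); rw [hpd] at this; exact this
    have h3 : (n ||| 2^(k+1)) % 2 = n % 2 := by
      rcases Nat.mod_two_eq_zero_or_one (n ||| 2^(k+1)) with h | h <;>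
      rcases Nat.mod_two_eq_zero_or_one n with h' | h'
      · omega
      · exfalso; have := (pvMod2_or n (2^(k+1))).2 (Or.inl h'); omega
      · have := (pvMod2_or n (2^(k+1))).1 h; omega
      · omega
    have h4 : (n &&& 2^(k+1)) % 2 = 0 := by
      rcases Nat.mod_two_eq_zero_or_one (n &&& 2^(k+1)) with h | h
      · exact h
      · have := (pvMod2_and n (2^(k+1))).1 h; omega
    have h5 := Nat.div_add_mod (n ||| 2^(k+1)) 2
    have h6 := Nat.div_add_mod (n &&& 2^(k+1)) 2
    have h7 := Nat.div_add_mod n 2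
    have h8 := ih (n / 2)
    omega

lemma pvAND2POW (n : Nat) (k : Nat) : n &&& 2 ^ k = ((n / 2 ^ k) % 2) * 2 ^ k := by
  rw [Nat.and_two_pow]
  congr 1
  rw [Nat.testBit_eq_decide_div_mod_eq]
  rcases Nat.mod_two_eq_zero_or_one (n / 2^k) with h | h <;> simp [h]

lemma pvNEGDIV (n : Nat) (k : Nat) :
    (-(n:Int) - 1) / ((2:Int) ^ k) = -((n / 2 ^ k : Nat) : Int) - 1 := by
  have hb : (0:Int) < 2 ^ k := by positivity
  have hmod := Nat.div_add_mod n (2 ^ k)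
  have hlt : n % 2 ^ k < 2 ^ k := Nat.mod_lt _ (by positivity)
  have h := (Int.ediv_emod_unique (a := -(n:Int) - 1) (b := (2:Int)^k)
    (q := -((n / 2 ^ k : Nat) : Int) - 1) (r := (2:Int)^k - 1 - (n % 2^k : Nat)) hb).2
  refine (h ?_).1
  constructor
  · push_cast
    push_cast at hmod
    nlinarith [hmod]
  · constructor
    · push_cast; omega
    · push_cast; omega

lemma pvCast2pow (k : Nat) : ((2:Int) ^ k) = (((2 ^ k : Nat)) : Int) := by push_cast; ring

lemma pvL1 (x : Int) (k : Nat) :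
    PySem.Int.bor x ((1 : Int) <<< k) = x + (1 - (x / 2 ^ k) % 2) * 2 ^ k := by
  have hsh : (1 : Int) <<< k = ((2 ^ k : Nat) : Int) := by
    simp [Int.shiftLeft_eq]
  rw [hsh, pvCast2pow]
  by_cases hx : 0 ≤ x
  · obtain ⟨n, rfl⟩ := Int.eq_ofNat_of_zero_le hx
    rw [show ((n:Int)) = ((n:Nat) : Int) from rfl, PySem.Int.bor_natCast]
    have hs := pvNSUM k n
    have ha := pvAND2POW n k
    have hd : ((n:Int)) / ((2^k : Nat) : Int) = ((n / 2^k : Nat) : Int) :=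
      (Int.natCast_ediv n (2^k)).symm
    have hm : ((n / 2^k : Nat) : Int) % 2 = ((n / 2^k % 2 : Nat) : Int) := by
      push_cast; rfl
    rw [hd, hm]
    rcases Nat.mod_two_eq_zero_or_one (n / 2 ^ k) with hb | hb <;>
      rw [hb] at ha ⊢ <;> simp only [Nat.zero_mul, Nat.one_mul] at ha <;>
      simp only [Nat.cast_zero, Nat.cast_one] <;> omega
  · have hx' : x = -((-x-1).toNat : Int) - 1 := by omega
    obtain ⟨n, hn⟩ : ∃ n : Nat, x = -(n:Int) - 1 := ⟨(-x-1).toNat, hx'⟩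
    subst hn
    have hbranch : PySem.Int.bor (-((n:Nat) : Int) - 1) ((2^k : Nat) : Int)
        = -(((n - (n &&& 2^k)) : Nat) : Int) - 1 := by
      have h1 : ¬ (0 ≤ -((n:Nat):Int) - 1) := by omega
      have h2 : (0:Int) ≤ ((2^k : Nat) : Int) := by positivity
      simp only [PySem.Int.bor, h1, h2, if_true, if_false]
      rw [show (-(-((n:Nat):Int) - 1) - 1) = ((n:Nat):Int) from by ring,
        Int.toNat_natCast, Int.toNat_natCast]
    rw [hbranch]
    have hs := pvNSUM k n
    have ha := pvAND2POW n k
    have hle : n &&& 2^k ≤ n := Nat.and_le_left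
    have hdiv : (-(n:Int) - 1) / ((2^k : Nat):Int) = -((n / 2^k : Nat) : Int) - 1 := by
      rw [← pvCast2pow]; exact pvNEGDIV n k
    rw [hdiv]
    have hm2 : (-((n / 2^k : Nat):Int) - 1) % 2 = 1 - ((n/2^k % 2 : Nat) : Int) := by
      omega
    rw [hm2]
    rcases Nat.mod_two_eq_zero_or_one (n / 2 ^ k) with hb | hb <;>
      rw [hb] at ha ⊢ <;> simp only [Nat.zero_mul, Nat.one_mul] at ha <;>
      simp only [Nat.cast_zero, Nat.cast_one] <;> omega

lemma pvL2 (x : Int) (k : Nat) :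
    PySem.Int.band x (Int.not ((1 : Int) <<< k)) = x - ((x / 2 ^ k) % 2) * 2 ^ k := by
  have hsh : (1 : Int) <<< k = ((2 ^ k : Nat) : Int) := by
    simp [Int.shiftLeft_eq]
  have hpos : (0:Int) ≤ ((2^k : Nat) : Int) := by positivity
  have hnot : Int.not ((1 : Int) <<< k) = -((2^k : Nat) : Int) - 1 := by
    rw [hsh]
    unfold Int.not
    cases h : ((2^k : Nat) : Int) with
    | ofNat m => simp [Int.negSucc_eq]; ring
    | negSucc m => exfalso; rw [h] at hpos; omega
  rw [hnot, pvCast2pow]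
  by_cases hx : 0 ≤ x
  · obtain ⟨n, rfl⟩ := Int.eq_ofNat_of_zero_le hx
    have hbranch : PySem.Int.band ((n:Nat) : Int) (-((2^k : Nat) : Int) - 1)
        = (((n - (n &&& 2^k)) : Nat) : Int) := by
      have h1 : (0:Int) ≤ ((n:Nat):Int) := by positivity
      have h2 : ¬ ((0:Int) ≤ -((2^k : Nat) : Int) - 1) := by omega
      simp only [PySem.Int.band, h1, h2, if_true, if_false]
      rw [show (-(-((2^k:Nat):Int) - 1) - 1) = ((2^k:Nat):Int) from by ring,
        Int.toNat_natCast, Int.toNat_natCast]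
    rw [hbranch]
    have ha := pvAND2POW n k
    have hle : n &&& 2^k ≤ n := Nat.and_le_left
    have hd : ((n:Int)) / ((2^k : Nat) : Int) = ((n / 2^k : Nat) : Int) :=
      (Int.natCast_ediv n (2^k)).symm
    have hm : ((n / 2^k : Nat) : Int) % 2 = ((n / 2^k % 2 : Nat) : Int) := by
      push_cast; rfl
    rw [hd, hm]
    rcases Nat.mod_two_eq_zero_or_one (n / 2 ^ k) with hb | hb <;>
      rw [hb] at ha ⊢ <;> simp only [Nat.zero_mul, Nat.one_mul] at ha <;>
      simp only [Nat.cast_zero, Nat.cast_one] <;> omega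
  · have hx' : x = -((-x-1).toNat : Int) - 1 := by omega
    obtain ⟨n, hn⟩ : ∃ n : Nat, x = -(n:Int) - 1 := ⟨(-x-1).toNat, hx'⟩
    subst hn
    have hbranch : PySem.Int.band (-((n:Nat) : Int) - 1) (-((2^k : Nat) : Int) - 1)
        = -(((n ||| 2^k) : Nat) : Int) - 1 := by
      have h1 : ¬ ((0:Int) ≤ -((n:Nat):Int) - 1) := by omega
      have h2 : ¬ ((0:Int) ≤ -((2^k : Nat) : Int) - 1) := by omega
      simp only [PySem.Int.band, h1, h2, if_false]
      rw [show (-(-((n:Nat):Int) - 1) - 1) = ((n:Nat):Int) from by ring,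
        show (-(-((2^k:Nat):Int) - 1) - 1) = ((2^k:Nat):Int) from by ring,
        Int.toNat_natCast, Int.toNat_natCast]
    rw [hbranch]
    have hs := pvNSUM k n
    have ha := pvAND2POW n k
    have hle : n &&& 2^k ≤ n := Nat.and_le_left
    have hdiv : (-(n:Int) - 1) / ((2^k : Nat):Int) = -((n / 2^k : Nat) : Int) - 1 := by
      rw [← pvCast2pow]; exact pvNEGDIV n k
    rw [hdiv]
    have hm2 : (-((n / 2^k : Nat):Int) - 1) % 2 = 1 - ((n/2^k % 2 : Nat) : Int) := by
      omega
    rw [hm2]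
    rcases Nat.mod_two_eq_zero_or_one (n / 2 ^ k) with hb | hb <;>
      rw [hb] at ha ⊢ <;> simp only [Nat.zero_mul, Nat.one_mul] at ha <;>
      simp only [Nat.cast_zero, Nat.cast_one] <;> omega


lemma pvF1 (a : Int) (m : Nat) :
    a % 2 ^ (m + 1) = a % 2 ^ m + 2 ^ m * ((a / 2 ^ m) % 2) := by
  have hp : (0:Int) < 2 ^ m := by positivity
  have hr0 : 0 ≤ a % 2^m := Int.emod_nonneg a (by positivity)
  have hr1 : a % 2^m < 2^m := Int.emod_lt_of_pos a hp
  have h1 := Int.mul_ediv_add_emod a (2^m)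
  have h2 := Int.mul_ediv_add_emod (a / 2^m) 2
  have key : a = (a % 2^m + 2^m * ((a/2^m) % 2)) + (2^m*2) * ((a/2^m)/2) := by
    nlinarith [h1, h2]
  have hps : (2:Int) ^ (m+1) = 2^m * 2 := by ring
  rw [hps]
  conv_lhs => rw [key]
  rw [Int.add_mul_emod_self_left]
  have hb : (a/2^m) % 2 = 0 ∨ (a/2^m) % 2 = 1 := by omega
  rcases hb with hb | hb <;> rw [hb] <;> rw [Int.emod_eq_of_lt (by linarith) (by linarith)]

lemma pvUpd_eq (x : Int) (k : Nat) (b : Int) (hb : b = 0 ∨ b = 1) :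
    pvUpd x k b = x - ((x / 2 ^ k) % 2) * 2 ^ k + b * 2 ^ k := by
  rcases hb with h | h <;> subst h
  · rw [pvUpd, if_neg (by norm_num), pvL2]; ring
  · rw [pvUpd, if_pos rfl, pvL1]; ring

lemma pvV_bounds (s : List Int) (base : Nat) (m : Nat) :
    0 ≤ pvV s m base ∧ pvV s m base < 2 ^ m := by
  induction m with
  | zero => simp [pvV]
  | succ K ih =>
    unfold pvV at *
    rw [List.range_succ, List.foldl_append]
    simp only [List.foldl_cons, List.foldl_nil]
    have hp : (0:Int) < 2 ^ K := by positivity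
    have hps : (2:Int) ^ (K+1) = 2^K * 2 := by ring
    rcases pvBitf_cases s (base + K) with h | h <;> rw [h] <;> constructor
    · linarith [ih.1]
    · rw [hps]; nlinarith [ih.2, hp]
    · linarith [ih.1, hp.le]
    · rw [hps]; linarith [ih.2]

lemma pvApply_eq (s : List Int) (a : Int) (base : Nat) (m : Nat) :
    pvApply s a m base = a - a % 2 ^ m + pvV s m base := by
  induction m with
  | zero => simp [pvApply, pvV]
  | succ K ih =>
    unfold pvApply pvV at *
    rw [List.range_succ, List.foldl_append, List.foldl_append, ih]
    simp only [List.foldl_cons, List.foldl_nil]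
    have hVb := pvV_bounds s base K
    unfold pvV at hVb
    set V := (List.range K).foldl (fun v k => v + pvBitf s (base + k) * 2 ^ k) 0 with hV
    have hp : (0:Int) < 2 ^ K := by positivity
    have hdiv : (a - a % 2 ^ K + V) / 2 ^ K = a / 2 ^ K := by
      have h1 : a - a % 2 ^ K = 2 ^ K * (a / 2 ^ K) := by
        have := Int.mul_ediv_add_emod a (2 ^ K); omega
      rw [h1, add_comm, Int.add_mul_ediv_left _ _ (by positivity : ((2:Int)^K) ≠ 0),
        Int.ediv_eq_zero_of_lt hVb.1 hVb.2]
      ring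
    rw [pvUpd_eq _ _ _ (pvBitf_cases s (base + K)), hdiv]
    have hF := pvF1 a K
    have hbit : (a / 2 ^ K) % 2 = 0 ∨ (a / 2 ^ K) % 2 = 1 := by omega
    have hps : (2:Int) ^ (K+1) = 2^K * 2 := by ring
    rcases pvBitf_cases s (base + K) with h | h <;> rw [h] <;>
      rcases hbit with h2 | h2 <;> rw [h2] at hF ⊢ <;> rw [hps] at * <;> ring_nf <;>
      ring_nf at hF <;> omega

lemma pvPAIR (s : List Int) (j : Nat) (c : Nat) :
    pvV s (2 * c) (8 * j) =
      (List.range c).foldl (fun v t => v + (2 - pvSrc s (4 * j + t)) * 4 ^ t) 0 := by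
  induction c with
  | zero => rfl
  | succ C ih =>
    unfold pvV at *
    rw [show 2 * (C + 1) = (2 * C + 1) + 1 from by ring, List.range_succ, List.foldl_append,
      List.range_succ, List.foldl_append, ih, List.range_succ, List.foldl_append]
    simp only [List.foldl_cons, List.foldl_nil]
    have h1 : pvBitf s (8 * j + 2 * C) = pvSrc s (4 * j + C) := by
      unfold pvBitf
      rw [if_pos (by omega), show (8 * j + 2 * C) / 2 = 4 * j + C from by omega]
    have h2 : pvBitf s (8 * j + (2 * C + 1)) = 1 - pvSrc s (4 * j + C) := by
      unfold pvBitf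
      rw [if_neg (by omega), show (8 * j + (2 * C + 1)) / 2 = 4 * j + C from by omega]
    rw [h1, h2]
    have e1 : (2:Int) ^ (2 * C) = 4 ^ C := by rw [pow_mul]; norm_num
    have e2 : (2:Int) ^ (2 * C + 1) = 2 * 4 ^ C := by rw [pow_succ, e1]; ring
    rw [e1, e2]
    ring


lemma pvFoldAppend {α : Type} (g : α → Int) (l : List α) :
    ∀ acc : List Int, l.foldl (fun out x => out ++ [g x]) acc = acc ++ l.map g := by
  induction l with
  | nil => intro acc; simp
  | cons a l ih => intro acc; simp [ih]

lemma pvSrc_flip (s : List Int) (i : Nat) :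
    (if i / 8 < s.length
      then PySem.Int.band ((s.getD (i / 8) 0) >>> (i % 8)) 1 else (0:Int)) = pvSrc s i := by
  unfold pvSrc
  by_cases h : i / 8 < s.length
  · rw [if_pos h, if_neg (by omega)]
  · rw [if_neg h, if_pos (by omega)]

lemma pvB_eq_map (s r : List Int) (bl : Int) :
    bit_expand_proc_alt s r bl = r.zipIdx.map (pvG s bl) := by
  unfold bit_expand_proc_alt
  show r.zipIdx.foldl (fun (out : List Int) (oj : Int × Nat) =>
      let m : Int := min 8 (2 * bl - 8 * (oj.2 : Int))
      if m ≤ 0 then out ++ [oj.1]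
      else
        let val : Int := (List.range (m.toNat / 2)).foldl (fun v t =>
          let i := 4 * oj.2 + t
          let s' : Int :=
            if i / 8 < s.length
            then PySem.Int.band ((s.getD (i / 8) 0) >>> (i % 8)) 1
            else 0
          v + (2 - s') * 4 ^ t) 0
        out ++ [oj.1 - oj.1 % (2 : Int) ^ m.toNat + val]) [] = _
  have hfn : (fun (out : List Int) (oj : Int × Nat) =>
      let m : Int := min 8 (2 * bl - 8 * (oj.2 : Int))
      if m ≤ 0 then out ++ [oj.1]
      else
        let val : Int := (List.range (m.toNat / 2)).foldl (fun v t =>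
          let i := 4 * oj.2 + t
          let s' : Int :=
            if i / 8 < s.length
            then PySem.Int.band ((s.getD (i / 8) 0) >>> (i % 8)) 1
            else 0
          v + (2 - s') * 4 ^ t) 0
        out ++ [oj.1 - oj.1 % (2 : Int) ^ m.toNat + val])
      = (fun (out : List Int) (oj : Int × Nat) => out ++ [pvG s bl oj]) := by
    funext out oj
    show (if min (8:Int) (2 * bl - 8 * (oj.2 : Int)) ≤ 0 then _ else _) = _
    unfold pvG
    by_cases h : min (8:Int) (2 * bl - 8 * (oj.2 : Int)) ≤ 0
    · rw [if_pos h, if_pos h]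
    · rw [if_neg h, if_neg h]
      have hg : (fun (v : Int) (t : Nat) =>
          let i := 4 * oj.2 + t
          let s' : Int :=
            if i / 8 < s.length
            then PySem.Int.band ((s.getD (i / 8) 0) >>> (i % 8)) 1
            else 0
          v + (2 - s') * 4 ^ t)
          = (fun (v : Int) (t : Nat) => v + (2 - pvSrc s (4 * oj.2 + t)) * 4 ^ t) := by
        funext v t
        show v + (2 - (if (4 * oj.2 + t) / 8 < s.length
            then PySem.Int.band ((s.getD ((4 * oj.2 + t) / 8) 0) >>> ((4 * oj.2 + t) % 8)) 1
            else (0:Int))) * 4 ^ t = _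
        rw [pvSrc_flip]
      simp only [hg]
  rw [hfn, pvFoldAppend]
  simp

lemma pvC (s : List Int) (bl : Int) :
    ∀ (r : List Int) (j : Nat),
      pvW s r (2 * bl.toNat - 8 * j) (8 * j) = (r.zipIdx j).map (pvG s bl) := by
  intro r
  induction r with
  | nil => intro j; rw [pvW_nil]; rfl
  | cons a r ih =>
    intro j
    rw [pvW_cons, List.zipIdx_cons, List.map_cons]
    congr 1
    · unfold pvG
      by_cases hc : min (8:Int) (2 * bl - 8 * ((a, j).2 : Int)) ≤ 0
      · rw [if_pos hc]
        have h0 : 2 * bl.toNat - 8 * j = 0 := by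
          simp only at hc; omega
        rw [h0]
        rfl
      · rw [if_neg hc]
        simp only at hc ⊢
        have hM : (min (8:Int) (2 * bl - 8 * (j : Int))).toNat
            = min (2 * bl.toNat - 8 * j) 8 := by omega
        rw [pvApply_eq, hM]
        congr 1
        have heven : min (2 * bl.toNat - 8 * j) 8
            = 2 * (min (2 * bl.toNat - 8 * j) 8 / 2) := by omega
        conv_lhs => rw [heven]
        exact pvPAIR s j _
    · have hL : 2 * bl.toNat - 8 * j - 8 = 2 * bl.toNat - 8 * (j + 1) := by omega
      have hB : 8 * j + 8 = 8 * (j + 1) := by omega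
      rw [hL, hB, ih (j + 1)]

-- ===== VERDICT (by name: the statement is the Claim_ definition above) =====
theorem bit_expand_proc_spec : Claim_equal_bit_expand_proc := by
  intro s r bl _
  unfold Spec_bit_expand_proc bit_expand_proc
  rw [show (fun (st : List Int × Nat) (i : Nat) =>
      let src_byte_idx := i / 8
      let src_bit_pos := i % 8
      let source_bit : Int :=
        if src_byte_idx ≥ s.length then 0
        else PySem.Int.band ((s.getD src_byte_idx 0) >>> src_bit_pos) 1
      let expanded_bits : List Int := if source_bit = 0 then [0, 1] else [1, 0]
      expanded_bits.foldl (fun (st2 : List Int × Nat) bit_val =>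
        let dest_byte_idx := st2.2 / 8
        let dest_bit_offset := st2.2 % 8
        let r :=
          if dest_byte_idx < st2.1.length then
            st2.1.modify dest_byte_idx (fun x =>
              if bit_val = 1 then PySem.Int.bor x ((1 : Int) <<< dest_bit_offset)
              else PySem.Int.band x (Int.not ((1 : Int) <<< dest_bit_offset)))
          else st2.1
        (r, st2.2 + 1)) st) = pvAStep s from funext fun st => funext fun i => pvAStep_eq s st i]
  rw [pvMain]
  show (pvExpanded s bl.toNat).zipIdx.foldl pvBStep r = _
  rw [pvExpanded_eq_map, pvZip_fold, pvB_eq_map]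
  have := pvC s bl r 0
  simpa using this
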